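-- pv_equiv track=rewrite | github.com/yamauk/checkio | scientific expedition/Square spiral.py | search_indices
-- ===== SOURCE A (Python) =====
-- def search_indices(table, first, second):
--     first_index = (-1, -1)
--     second_index = (-1, -1)
--     for r, row in enumerate(table):
--         if first in row:
--             first_index = (r, row.index(first))
--         if second in row:
--             second_index = (r, row.index(second))
--     return first_index, second_index
-- ===== SOURCE B (Python) =====
-- def search_indices(table, first, second):
--     def locate(value):
--         for r in range(len(table) - 1, -1, -1):
--             row = table[r]
--             if value in row:
--                 return (r, row.index(value))
--         return (-1, -1)
--     return locate(first), locate(second)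
-- ===== Notes on version B (the rewrite author's own statement) =====
-- stated objective: alternative
-- what changed: Replaces A's single forward pass that overwrites each result on every matching row with two independent backward scans (one per value) that stop at the first row from the bottom containing the value.
import Mathlib
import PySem

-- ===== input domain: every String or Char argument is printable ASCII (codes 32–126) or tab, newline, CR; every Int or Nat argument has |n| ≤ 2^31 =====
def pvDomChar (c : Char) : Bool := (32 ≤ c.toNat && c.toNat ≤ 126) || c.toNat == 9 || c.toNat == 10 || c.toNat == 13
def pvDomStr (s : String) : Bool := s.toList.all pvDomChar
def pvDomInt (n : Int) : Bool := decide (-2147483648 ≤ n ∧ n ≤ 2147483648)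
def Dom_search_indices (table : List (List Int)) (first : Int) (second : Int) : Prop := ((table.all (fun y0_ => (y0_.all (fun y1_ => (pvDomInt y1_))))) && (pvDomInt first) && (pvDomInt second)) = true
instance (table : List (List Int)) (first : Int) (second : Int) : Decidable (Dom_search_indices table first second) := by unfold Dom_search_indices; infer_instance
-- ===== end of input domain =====

-- B replaces A's single forward pass (overwriting each result at every matching row) with two
-- independent backward early-exiting scans, one per value; same return value, similar cost.


-- ===== PORT A =====
-- loop body of A's 'for r, row in enumerate(table)': overwrite each component on a match
def pvStepA (first second : Int) (st : (Int × Int) × (Int × Int)) (p : Int × List Int) :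
    (Int × Int) × (Int × Int) :=
  let fi : Int × Int := if first ∈ p.2 then (p.1, ((PySem.List.index? p.2 first).getD 0 : Nat)) else st.1
  let si : Int × Int := if second ∈ p.2 then (p.1, ((PySem.List.index? p.2 second).getD 0 : Nat)) else st.2
  (fi, si)

def search_indices (table : List (List Int)) (first : Int) (second : Int) : (Int × Int) × (Int × Int) :=
  (PySem.List.enumerate table 0).foldl (pvStepA first second) ((-1, -1), (-1, -1))

-- ===== PORT B =====
-- B's 'locate': walk the rows bottom-up, return at the first row containing the value
def pvLocate (value : Int) : List (Int × List Int) → Int × Int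
  | [] => (-1, -1)
  | (r, row) :: rest =>
    if value ∈ row then (r, ((PySem.List.index? row value).getD 0 : Nat)) else pvLocate value rest

def search_indices_alt (table : List (List Int)) (first : Int) (second : Int) : (Int × Int) × (Int × Int) :=
  let rows := (PySem.List.enumerate table 0).reverse
  (pvLocate first rows, pvLocate second rows)

-- ===== PRECONDITION & SPEC =====
def Spec_search_indices (table : List (List Int)) (first : Int) (second : Int) (out : (Int × Int) × (Int × Int)) : Prop := out = search_indices_alt table first second
instance (table : List (List Int)) (first : Int) (second : Int) (out : (Int × Int) × (Int × Int)) : Decidable (Spec_search_indices table first second out) := by unfold Spec_search_indices; infer_instance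

-- ===== CLAIM (what is proved, stated in full; the proofs are below) =====
def Claim_equal_search_indices : Prop := ∀ (table : List (List Int)) (first : Int) (second : Int), Dom_search_indices table first second → Spec_search_indices table first second (search_indices table first second)

-- ===== LEMMAS AND PROOFS =====

-- pvLocate with an arbitrary default, to state the fold invariant
def pvLocD (value : Int) (d : Int × Int) : List (Int × List Int) → Int × Int
  | [] => d
  | (r, row) :: rest =>
    if value ∈ row then (r, ((PySem.List.index? row value).getD 0 : Nat)) else pvLocD value d rest

theorem pvLocD_append (v : Int) (d : Int × Int) (a b : List (Int × List Int)) :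
    pvLocD v d (a ++ b) = pvLocD v (pvLocD v d b) a := by
  induction a with
  | nil => rfl
  | cons x xs ih => cases x; simp [pvLocD, ih]

theorem pvLocD_neg (v : Int) (l : List (Int × List Int)) :
    pvLocD v (-1, -1) l = pvLocate v l := by
  induction l with
  | nil => rfl
  | cons x xs ih => cases x; simp [pvLocD, pvLocate, ih]

theorem fold_eq (first second : Int) (l : List (Int × List Int)) :
    ∀ st : (Int × Int) × (Int × Int),
      l.foldl (pvStepA first second) st =
        (pvLocD first st.1 l.reverse, pvLocD second st.2 l.reverse) := by
  induction l with
  | nil => intro st; rfl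
  | cons x xs ih =>
    intro st
    cases x with
    | mk r row =>
      simp only [List.foldl_cons, ih, List.reverse_cons, pvLocD_append]
      simp [pvStepA, pvLocD]

-- ===== VERDICT (by name: the statement is the Claim_ definition above) =====
theorem search_indices_spec : Claim_equal_search_indices := by
  intro table first second _
  show search_indices table first second = search_indices_alt table first second
  simp [search_indices, search_indices_alt, fold_eq, pvLocD_neg]
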